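-- pv_equiv track=rewrite | github.com/junkeon/programmers | day016/prob044.py | solution
-- ===== SOURCE A (Python) =====
-- def solution(heights):
--     N = len(heights)
--
--     heights = heights[::-1]
--     answer = [0] * N
--     stack = []
--
--     for i in range(N):
--         while stack and stack[-1][1] < heights[i]:
--             j, _ = stack.pop()
--             answer[j] = N - i
--         stack.append((i, heights[i]))
--
--     return answer[::-1]
-- ===== SOURCE B (Python) =====
-- def solution(heights):
--     res = []
--     for i in range(len(heights)):
--         r = 0
--         for j in range(i - 1, -1, -1):
--             if heights[j] > heights[i]:
--                 r = j + 1
--                 break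
--         res.append(r)
--     return res
-- ===== Notes on version B (the rewrite author's own statement) =====
-- stated objective: simpler
-- what changed: Replaces the reversed-array monotonic-stack pass with a direct backward scan from each index for the nearest strictly taller tower to its left (1-based index, 0 if none).
import Mathlib
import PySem

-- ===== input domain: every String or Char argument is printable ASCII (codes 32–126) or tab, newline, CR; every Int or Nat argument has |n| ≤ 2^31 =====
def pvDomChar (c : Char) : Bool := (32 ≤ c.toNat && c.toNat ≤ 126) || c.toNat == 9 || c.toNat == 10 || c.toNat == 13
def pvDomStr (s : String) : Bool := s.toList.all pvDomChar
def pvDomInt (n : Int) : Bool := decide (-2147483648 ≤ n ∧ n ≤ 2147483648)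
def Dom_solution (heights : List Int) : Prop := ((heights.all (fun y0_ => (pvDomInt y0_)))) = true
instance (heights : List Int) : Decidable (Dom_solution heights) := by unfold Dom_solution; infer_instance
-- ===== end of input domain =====

-- B replaces A's reversed-array monotonic stack by a plain backward scan per index (simpler, not faster).

-- ===== PORT A =====
-- Python's stack (append/pop at the END of the list) is represented with its top at the HEAD;
-- same stack contents, same pops, same order of answer updates.
def popA (N i : Nat) (hi : Int) : List (Nat × Int) → List Int → List (Nat × Int) × List Int
  | [], ans => ([], ans)
  | (j, v) :: rest, ans =>
    if v < hi then popA N i hi rest (ans.set j ((N : Int) - (i : Int)))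
    else ((j, v) :: rest, ans)

def stepA (N : Nat) (h : List Int) (st : List (Nat × Int) × List Int) (i : Nat) :
    List (Nat × Int) × List Int :=
  let hi := h.getD i 0   -- h[i]; i < N = h.length always, so getD is exact here
  let r := popA N i hi st.1 st.2
  ((i, hi) :: r.1, r.2)

def solution (heights : List Int) : List Int :=
  let N := heights.length
  let h := heights.reverse
  (((List.range N).foldl (stepA N h) ([], List.replicate N 0)).2).reverse

-- ===== PORT B =====
-- scan j = i-1, i-2, …, 0; first j with heights[j] > heights[i] gives j+1, else 0
def scanLeft (heights : List Int) (hi : Int) : Nat → Int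
  | 0 => 0
  | j + 1 => if heights.getD j 0 > hi then ((j : Int) + 1) else scanLeft heights hi j

def solution_alt (heights : List Int) : List Int :=
  (List.range heights.length).map (fun i => scanLeft heights (heights.getD i 0) i)

-- ===== PRECONDITION & SPEC =====
def Spec_solution (heights : List Int) (out : List Int) : Prop := out = solution_alt heights
instance (heights : List Int) (out : List Int) : Decidable (Spec_solution heights out) := by unfold Spec_solution; infer_instance

-- ===== CLAIM (what is proved, stated in full; the proofs are below) =====
def Claim_equal_solution : Prop := ∀ (heights : List Int), Dom_solution heights → Spec_solution heights (solution heights)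

-- ===== LEMMAS AND PROOFS =====

-- first k in [j+1, i) with g[j] < g[k]  (index of the tower that receives the j-th signal)
def fg (g : List Int) (j i : Nat) : Option Nat :=
  (List.range' (j+1) (i - (j+1))).find? (fun k => decide (g.getD j 0 < g.getD k 0))

def ansSpec (g : List Int) (N i j : Nat) : Int :=
  match fg g j i with
  | some k => (N : Int) - (k : Int)
  | none => 0

-- j is still on the stack after processing indices < i
def aliveB (g : List Int) (i j : Nat) : Bool :=
  (List.range' (j+1) (i - (j+1))).all (fun k => decide (g.getD k 0 ≤ g.getD j 0))

def stackSpec (g : List Int) (i : Nat) : List (Nat × Int) :=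
  (((List.range i).filter (aliveB g i)).map (fun j => (j, g.getD j 0))).reverse

lemma alive_iff_fg_none (g : List Int) (i j : Nat) :
    aliveB g i j = true ↔ fg g j i = none := by
  simp [aliveB, fg, List.find?_eq_none, List.all_eq_true, not_lt]

lemma popA_eq (N i : Nat) (hi : Int) : ∀ (l : List (Nat × Int)) (ans : List Int),
    popA N i hi l ans =
      (l.dropWhile (fun p => decide (p.2 < hi)),
       (l.takeWhile (fun p => decide (p.2 < hi))).foldl
         (fun a p => a.set p.1 ((N : Int) - (i : Int))) ans) := by
  intro l
  induction l with
  | nil => intro ans; simp [popA]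
  | cons p rest ih =>
    intro ans
    obtain ⟨j, v⟩ := p
    by_cases h : v < hi <;> simp [popA, h, ih]

lemma tw_dw_filter {α : Type} (p : α → Bool) :
    ∀ l : List α, l.Pairwise (fun a b => p b = true → p a = true) →
      l.takeWhile p = l.filter p ∧ l.dropWhile p = l.filter (fun x => !p x) := by
  intro l
  induction l with
  | nil => simp
  | cons x xs ih =>
    intro hp
    rw [List.pairwise_cons] at hp
    obtain ⟨hx, hxs⟩ := hp
    by_cases h : p x = true
    · simpa [List.takeWhile_cons, List.filter_cons, List.dropWhile_cons, h] using ih hxs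
    · have h0 : ∀ b ∈ xs, p b = false := by
        intro b hb
        cases hh : p b
        · rfl
        · exact absurd (hx b hb hh) h
      constructor
      · simp [h, List.filter_eq_nil_iff]
        intro a ha; simp [h0 a ha]
      · simp [h]
        exact (List.filter_eq_self.mpr (fun a ha => by simp [h0 a ha])).symm

lemma stackSpec_pairwise (g : List Int) (i : Nat) (hi : Int) :
    (stackSpec g i).Pairwise
      (fun a b => (decide (b.2 < hi)) = true → (decide (a.2 < hi)) = true) := by
  unfold stackSpec
  rw [List.pairwise_reverse, List.pairwise_map]
  rw [List.pairwise_iff_forall_sublist]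
  intro a b hsub
  have hmem : a ∈ (List.range i).filter (aliveB g i) ∧ b ∈ (List.range i).filter (aliveB g i) := by
    constructor
    · exact hsub.subset (by simp)
    · exact hsub.subset (by simp)
  obtain ⟨ha, hb⟩ := hmem
  rw [List.mem_filter, List.mem_range] at ha hb
  have hab : a < b := by
    have : [a, b].Sublist (List.range i) := hsub.trans List.filter_sublist
    have := List.pairwise_lt_range.sublist this
    simpa using this
  -- a alive at i and a < b < i  ⇒  g[b] ≤ g[a]
  have hle : g.getD b 0 ≤ g.getD a 0 := by
    have := (List.all_eq_true.mp ha.2) b (by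
      rw [List.mem_range'_1]
      constructor <;> omega)
    simpa using this
  intro hlt
  simp only [decide_eq_true_eq] at hlt ⊢
  omega

lemma foldl_set_length (v : Int) (l : List (Nat × Int)) :
    ∀ (ans : List Int), (l.foldl (fun a p => a.set p.1 v) ans).length = ans.length := by
  induction l with
  | nil => intro ans; simp
  | cons p rest ih => intro ans; simp [ih]

lemma foldl_set_getD (v : Int) (l : List (Nat × Int)) :
    ∀ (ans : List Int) (j : Nat), j < ans.length →
      ((l.foldl (fun a p => a.set p.1 v) ans).getD j 0 =
        if l.any (fun p => p.1 == j) then v else ans.getD j 0) ∧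
      (l.foldl (fun a p => a.set p.1 v) ans).length = ans.length := by
  induction l with
  | nil => intro ans j hj; simp
  | cons p rest ih =>
    intro ans j hj
    have hlen : (ans.set p.1 v).length = ans.length := by simp
    obtain ⟨h1, h2⟩ := ih (ans.set p.1 v) j (by omega)
    refine ⟨?_, by simpa [hlen] using h2⟩
    simp only [List.foldl_cons, List.any_cons]
    rw [h1]
    by_cases hpj : p.1 = j
    · simp [hpj, List.getD_eq_getElem?_getD, List.getElem?_set_self (by omega)]
    · by_cases hr : rest.any (fun p => p.1 == j)
      · simp [hr]
      · simp [hr, hpj, List.getD_eq_getElem?_getD, List.getElem?_set_ne hpj]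

lemma fg_succ (g : List Int) (j i : Nat) (hj : j < i) :
    fg g j (i+1) = (fg g j i).or
      ((if g.getD j 0 < g.getD i 0 then some i else none)) := by
  unfold fg
  have : i + 1 - (j+1) = (i - (j+1)) + 1 := by omega
  rw [this, List.range'_1_concat]
  have : j + 1 + (i - (j + 1)) = i := by omega
  rw [this, List.find?_append]
  congr 1
  by_cases h : g.getD j 0 < g.getD i 0 <;>
    · simp only [List.getD_eq_getElem?_getD] at h ⊢
      simp [List.find?, h]

lemma fg_ge (g : List Int) (j i : Nat) (hj : i ≤ j + 1) : fg g j i = none := by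
  unfold fg
  have : i - (j+1) = 0 := by omega
  simp [this]

lemma alive_succ (g : List Int) (j i : Nat) (hj : j < i) :
    aliveB g (i+1) j = (aliveB g i j && decide (g.getD i 0 ≤ g.getD j 0)) := by
  unfold aliveB
  have h1 : i + 1 - (j+1) = (i - (j+1)) + 1 := by omega
  rw [h1, List.range'_1_concat]
  have h2 : j + 1 + (i - (j + 1)) = i := by omega
  rw [h2, List.all_append]
  simp

lemma step_inv (g : List Int) (N i : Nat) (_hiN : i ≤ N) (ans : List Int)
    (hlen : ans.length = N) (hans : ∀ j, j < N → ans.getD j 0 = ansSpec g N i j) :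
    (stepA N g (stackSpec g i, ans) i).1 = stackSpec g (i+1) ∧
    (stepA N g (stackSpec g i, ans) i).2.length = N ∧
    (∀ j, j < N → (stepA N g (stackSpec g i, ans) i).2.getD j 0 = ansSpec g N (i+1) j) := by
  set hi := g.getD i 0 with hhi
  have hpw := stackSpec_pairwise g i hi
  obtain ⟨htw, hdw⟩ := tw_dw_filter (fun p => decide (p.2 < hi)) (stackSpec g i) hpw
  have hstep : stepA N g (stackSpec g i, ans) i =
      ((i, hi) :: (stackSpec g i).filter (fun p => !decide (p.2 < hi)),
       ((stackSpec g i).filter (fun p => decide (p.2 < hi))).foldl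
         (fun a p => a.set p.1 ((N : Int) - (i : Int))) ans) := by
    simp only [stepA, popA_eq, htw, hdw, ← hhi]
  rw [hstep]
  -- membership in the popped list
  have hpop : ∀ j : Nat,
      ((stackSpec g i).filter (fun p => decide (p.2 < hi))).any (fun p => p.1 == j) =
        (decide (j < i) && aliveB g i j && decide (g.getD j 0 < hi)) := by
    intro j
    rcases Bool.eq_false_or_eq_true ((decide (j < i) && aliveB g i j && decide (g.getD j 0 < hi))) with h | h
    swap
    · rw [h]
      rw [List.any_eq_false]
      intro p hp
      rw [List.mem_filter] at hp
      obtain ⟨hp1, hp2⟩ := hp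
      unfold stackSpec at hp1
      rw [List.mem_reverse, List.mem_map] at hp1
      obtain ⟨j', hj', rfl⟩ := hp1
      rw [List.mem_filter, List.mem_range] at hj'
      simp only [beq_iff_eq]
      intro hje
      subst hje
      simp only [Bool.and_eq_false_iff] at h  -- contradiction hunting
      rcases h with h | h
      · rcases h with h | h
        · simp [hj'.1] at h
        · simp [hj'.2] at h
      · simp only [decide_eq_true_eq, List.getD_eq_getElem?_getD] at hp2
        simp only [List.getD_eq_getElem?_getD] at h
        simp [hp2] at h
    · rw [h]
      rw [List.any_eq_true]
      simp only [Bool.and_eq_true, decide_eq_true_eq] at h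
      refine ⟨(j, g.getD j 0), ?_, by simp⟩
      rw [List.mem_filter]
      constructor
      · unfold stackSpec
        rw [List.mem_reverse, List.mem_map]
        exact ⟨j, by rw [List.mem_filter, List.mem_range]; exact ⟨h.1.1, h.1.2⟩, rfl⟩
      · simpa using h.2
  refine ⟨?_, ?_, ?_⟩
  · -- stack part
    unfold stackSpec
    rw [List.range_succ, List.filter_append, List.map_append, List.reverse_append]
    have hai : aliveB g (i+1) i = true := by
      unfold aliveB; simp
    rw [List.filter_cons]
    simp only [hai, if_pos]
    simp only [List.filter_nil, List.map_cons, List.map_nil, List.reverse_cons,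
      List.reverse_nil, List.nil_append, List.cons_append, List.nil_append]
    congr 1
    rw [List.filter_reverse, List.filter_map]
    congr 1
    rw [List.filter_filter]
    congr 1
    apply List.filter_congr
    intro j hj
    rw [List.mem_range] at hj
    rw [alive_succ g j i hj]
    rcases Bool.eq_false_or_eq_true (aliveB g i j) with h | h <;>
      simp [h, hhi, List.getD_eq_getElem?_getD, ← decide_not, Bool.and_comm]
  · -- length
    exact (foldl_set_length _ _ ans).trans hlen
  · -- answer part
    intro j hjN
    rw [(foldl_set_getD ((N : Int) - (i : Int)) _ ans j (by omega)).1, hpop j, hans j hjN]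
    by_cases hji : j < i
    · cases hfg : fg g j i with
      | some k =>
        have halive : aliveB g i j = false := by
          rcases Bool.eq_false_or_eq_true (aliveB g i j) with h | h
          · rw [alive_iff_fg_none] at h; simp [h] at hfg
          · exact h
        simp [ansSpec, hfg, fg_succ g j i hji, halive, hji]
      | none =>
        have halive : aliveB g i j = true := (alive_iff_fg_none g i j).mpr hfg
        simp [ansSpec, hfg, fg_succ g j i hji, halive, hji, hhi]
        split <;> simp
    · simp [hji, ansSpec, fg_ge g j i (by omega), fg_ge g j (i+1) (by omega)]

lemma fold_inv (g : List Int) (N : Nat) : ∀ n, n ≤ N →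
    ((List.range n).foldl (stepA N g) ([], List.replicate N 0)).1 = stackSpec g n ∧
    ((List.range n).foldl (stepA N g) ([], List.replicate N 0)).2.length = N ∧
    ∀ j, j < N → ((List.range n).foldl (stepA N g) ([], List.replicate N 0)).2.getD j 0 = ansSpec g N n j := by
  intro n
  induction n with
  | zero =>
    intro _
    refine ⟨by simp [stackSpec], by simp, ?_⟩
    intro j hj
    simp [ansSpec, fg]
  | succ n ih =>
    intro hn
    obtain ⟨h1, h2, h3⟩ := ih (by omega)
    rw [List.range_succ, List.foldl_append, List.foldl_cons, List.foldl_nil]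
    have hpair : ((List.range n).foldl (stepA N g) ([], List.replicate N 0)) =
        (stackSpec g n, ((List.range n).foldl (stepA N g) ([], List.replicate N 0)).2) := by
      rw [← h1]
    rw [hpair]
    exact step_inv g N n (by omega) _ h2 h3

lemma scanLeft_eq_find (h : List Int) (v : Int) : ∀ p : Nat,
    scanLeft h v p =
      match (List.range p).reverse.find? (fun m => decide (v < h.getD m 0)) with
      | some m => (m : Int) + 1
      | none => 0 := by
  intro p
  induction p with
  | zero => simp [scanLeft]
  | succ p ih =>
    rw [List.range_succ, List.reverse_append]
    simp only [List.reverse_cons, List.reverse_nil, List.nil_append, List.cons_append,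
      List.nil_append, List.find?]
    by_cases hp : h.getD p 0 > v
    · simp only [scanLeft, if_pos hp]
      have : decide (v < h.getD p 0) = true := by simpa using hp
      rw [this]
    · simp only [scanLeft, if_neg hp]
      have : decide (v < h.getD p 0) = false := by simpa using hp
      rw [this, ih]

lemma find?_congr' {α : Type} (p q : α → Bool) : ∀ l : List α,
    (∀ x ∈ l, p x = q x) → l.find? p = l.find? q := by
  intro l
  induction l with
  | nil => intro _; rfl
  | cons x xs ih =>
    intro hpq
    simp only [List.find?]
    rw [hpq x (by simp)]
    cases q x
    · exact ih (fun y hy => hpq y (by simp [hy]))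
    · rfl

lemma range'_eq_rev_map (N p : Nat) (hp : p ≤ N) :
    List.range' (N - p) p = ((List.range p).reverse).map (fun m => N - 1 - m) := by
  apply List.ext_getElem
  · simp
  · intro l h1 h2
    simp only [List.getElem_range', List.getElem_map, List.getElem_reverse, List.getElem_range,
      List.length_range, Nat.one_mul]
    simp only [List.length_range'] at h1
    omega

lemma getD_reverse (heights : List Int) (m : Nat) (hm : m < heights.length) :
    heights.reverse.getD (heights.length - 1 - m) 0 = heights.getD m 0 := by
  rw [List.getD_eq_getElem?_getD, List.getD_eq_getElem?_getD,
    List.getElem?_reverse (by omega)]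
  congr 2
  omega

lemma bridge (heights : List Int) (p : Nat) (hp : p < heights.length) :
    ansSpec heights.reverse heights.length heights.length (heights.length - 1 - p) =
      scanLeft heights (heights.getD p 0) p := by
  unfold ansSpec fg
  have h1 : heights.length - (heights.length - 1 - p + 1) = p := by omega
  have h2 : heights.length - 1 - p + 1 = heights.length - p := by omega
  rw [h1, h2, range'_eq_rev_map heights.length p (by omega), List.find?_map,
    scanLeft_eq_find]
  rw [find?_congr' _ (fun m => decide (heights.getD p 0 < heights.getD m 0)) _ (fun m hm => ?_)]
  · cases hfind : (List.range p).reverse.find? (fun m => decide (heights.getD p 0 < heights.getD m 0)) with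
    | none => simp
    | some m =>
      have hm : m < p := by
        have := List.mem_of_find?_eq_some hfind
        simp at this
        exact this
      simp only [Option.map_some]
      have hh2 : ((heights.length - 1 - m : Nat) : Int) = (heights.length : Int) - (m + 1) := by
        omega
      rw [hh2]; ring
  · simp only [List.mem_reverse, List.mem_range] at hm
    simp only [Function.comp]
    rw [getD_reverse heights p hp, getD_reverse heights m (by omega)]

theorem solution_spec : Claim_equal_solution := by
  unfold Claim_equal_solution
  intro heights _
  unfold Spec_solution solution solution_alt
  obtain ⟨h1, h2, h3⟩ := fold_inv heights.reverse heights.length heights.length le_rfl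
  set F := ((List.range heights.length).foldl (stepA heights.length heights.reverse)
      ([], List.replicate heights.length 0)).2 with hF
  apply List.ext_getElem
  · simp only [List.length_reverse, List.length_map, List.length_range]
    exact h2
  · intro p hp1 hp2
    have hpN : p < heights.length := by simpa using hp2
    simp only [List.getElem_reverse, List.getElem_map, List.getElem_range]
    have e1 : F[F.length - 1 - p]'(by omega) = F.getD (F.length - 1 - p) 0 :=
      (List.getD_eq_getElem F 0 (by omega)).symm
    rw [e1, h2, h3 (heights.length - 1 - p) (by omega)]
    exact bridge heights p hpN
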